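-- pv_equiv track=rewrite | github.com/oeiua/fun-poker-th | poker_training.py | _check_straight_potential
-- ===== SOURCE A (Python) =====
-- def _check_straight_potential(values):
--     """Check for straight potential by counting consecutive cards"""
--     if not values:
--         return 0
--
--     unique_values = sorted(set(values))
--     max_consecutive = 1
--     current_consecutive = 1
--
--     for i in range(1, len(unique_values)):
--         if unique_values[i] == unique_values[i-1] + 1:
--             current_consecutive += 1
--             max_consecutive = max(max_consecutive, current_consecutive)
--         else:
--             current_consecutive = 1
--
--     return max_consecutive
-- ===== SOURCE B (Python) =====
-- def _check_straight_potential(values):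
--     """Check for straight potential by counting consecutive cards"""
--     if not values:
--         return 0
--
--     present = set(values)
--     best = 1
--     for v in present:
--         if v - 1 not in present:  # v starts a run
--             length = 1
--             while v + length in present:
--                 length += 1
--             if length > best:
--                 best = length
--     return best
-- ===== Notes on version B (the rewrite author's own statement) =====
-- stated objective: alternative
-- what changed: Replaced sort-then-linear-scan over the deduplicated values by the classic hash-set algorithm: for each value whose predecessor is absent (a run start) walk upward through the set counting the run, keeping the maximum; no sorting at all.
import Mathlib
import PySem

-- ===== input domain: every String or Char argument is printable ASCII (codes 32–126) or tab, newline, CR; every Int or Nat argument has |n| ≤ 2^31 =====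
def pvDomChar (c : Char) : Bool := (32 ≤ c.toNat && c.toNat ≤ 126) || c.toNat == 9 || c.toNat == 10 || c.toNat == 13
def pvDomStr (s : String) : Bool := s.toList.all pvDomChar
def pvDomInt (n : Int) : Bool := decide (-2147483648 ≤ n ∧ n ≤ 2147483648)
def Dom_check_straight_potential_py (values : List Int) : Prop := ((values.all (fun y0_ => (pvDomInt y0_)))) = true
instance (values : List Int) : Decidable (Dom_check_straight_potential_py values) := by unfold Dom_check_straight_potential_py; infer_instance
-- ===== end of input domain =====

-- B replaces sort-then-scan by the set-based "expand upward from run starts" pass; return value only, no mutation.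

-- ===== PORT A =====
-- literal port of A: sorted(set(values)), then a fold over range(1, len) tracking
-- (max_consecutive, current_consecutive); indices are always in range, so pyGetD's default is never used.
def check_straight_potential_py (values : List Int) : Int :=
  if values = [] then 0
  else
    let uv := PySem.List.sorted (PySem.Set.ofList values) (fun x => x) false
    ((PySem.List.pyRange 1 (uv.length : Int) 1).foldl
      (fun (st : Int × Int) i =>
        if PySem.List.pyGetD uv i 0 = PySem.List.pyGetD uv (i - 1) 0 + 1 then
          (max st.1 (st.2 + 1), st.2 + 1)
        else (st.1, 1))
      (1, 1)).1

-- ===== PORT B =====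
-- the while-loop of B, with fuel = size of the set (the run length never exceeds it, so this is exact)
def pvWalk (s : List Int) : Nat → Int → Int → Int
  | 0, _, len => len
  | f + 1, v, len => if (v + len) ∈ s then pvWalk s f v (len + 1) else len

def check_straight_potential_py_alt (values : List Int) : Int :=
  if values = [] then 0
  else
    let s := PySem.Set.ofList values
    s.foldl
      (fun best v =>
        if (v - 1) ∈ s then best
        else max best (pvWalk s s.length v 1))
      1

-- ===== PRECONDITION & SPEC =====
def Spec_check_straight_potential_py (values : List Int) (out : Int) : Prop := out = check_straight_potential_py_alt values
instance (values : List Int) (out : Int) : Decidable (Spec_check_straight_potential_py values out) := by unfold Spec_check_straight_potential_py; infer_instance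

-- ===== CLAIM (what is proved, stated in full; the proofs are below) =====
def Claim_equal_check_straight_potential_py : Prop := ∀ (values : List Int), Dom_check_straight_potential_py values → Spec_check_straight_potential_py values (check_straight_potential_py values)

-- ===== LEMMAS AND PROOFS =====

-- proof-side view of pvWalk: "climb" counts how many of c, c+1, c+2, … are in L
def pvClimb (L : List Int) : Nat → Int → Int
  | 0, _ => 0
  | f + 1, c => if c ∈ L then 1 + pvClimb L f (c + 1) else 0

-- proof-side structural form of A's scan
def pvScan : Int → Int → Int → List Int → Int
  | _, maxc, _, [] => maxc
  | prev, maxc, curc, y :: ys =>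
    if y = prev + 1 then pvScan y (max maxc (curc + 1)) (curc + 1) ys
    else pvScan y maxc 1 ys

theorem pvWalk_eq_climb (L : List Int) : ∀ (f : Nat) (v len : Int),
    pvWalk L f v len = len + pvClimb L f (v + len) := by
  intro f
  induction f with
  | zero => intro v len; simp [pvWalk, pvClimb]
  | succ f ih =>
    intro v len
    simp only [pvWalk, pvClimb]
    by_cases h : (v + len) ∈ L
    · simp only [if_pos h, ih v (len + 1)]
      ring_nf
    · simp [h]

theorem pvClimb_nonneg (L : List Int) : ∀ (f : Nat) (c : Int), 0 ≤ pvClimb L f c := by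
  intro f
  induction f with
  | zero => intro c; simp [pvClimb]
  | succ f ih =>
    intro c
    simp only [pvClimb]
    by_cases h : c ∈ L
    · simp only [if_pos h]; have := ih (c + 1); omega
    · simp [h]

theorem pvClimb_congr (L M : List Int) (h : ∀ w : Int, w ∈ L ↔ w ∈ M) :
    ∀ (f : Nat) (c : Int), pvClimb L f c = pvClimb M f c := by
  intro f
  induction f with
  | zero => intro c; simp [pvClimb]
  | succ f ih =>
    intro c
    simp only [pvClimb, h c, ih (c + 1)]

theorem pvFilter_split (L : List Int) (c : Int) :
    (L.filter (fun w => decide (c ≤ w))).length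
      = (L.filter (fun w => decide (c + 1 ≤ w))).length + L.count c := by
  induction L with
  | nil => simp
  | cons w L ih =>
    simp only [List.filter_cons, List.count_cons]
    by_cases h1 : c ≤ w
    · by_cases h2 : c + 1 ≤ w
      · have hne : ¬ w = c := by omega
        simp [h1, h2, hne, ih]
        omega
      · have heq : w = c := by omega
        simp [heq, ih]
        omega
    · have h2 : ¬ c + 1 ≤ w := by omega
      have hne : ¬ w = c := by omega
      simp [h1, h2, hne, ih]

theorem pvClimb_succ_fuel (L : List Int) : ∀ (f : Nat) (c : Int),
    (L.filter (fun w => decide (c ≤ w))).length ≤ f →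
    pvClimb L (f + 1) c = pvClimb L f c := by
  intro f
  induction f with
  | zero =>
    intro c hc
    have hcm : c ∉ L := by
      intro hmem
      have : 1 ≤ L.count c := List.one_le_count_iff.mpr hmem
      have := pvFilter_split L c
      omega
    simp [pvClimb, hcm]
  | succ f ih =>
    intro c hc
    by_cases h : c ∈ L
    · have h1 : 1 ≤ L.count c := List.one_le_count_iff.mpr h
      have h2 := pvFilter_split L c
      have e : ∀ g : Nat, pvClimb L (g + 1) c = 1 + pvClimb L g (c + 1) := fun g => by
        simp only [pvClimb, if_pos h]
      rw [e (f + 1), e f, ih (c + 1) (by omega)]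
    · simp [pvClimb, h]

theorem pvClimb_not_mem (L : List Int) (f : Nat) (c : Int) (h : c ∉ L) :
    pvClimb L f c = 0 := by
  cases f <;> simp [pvClimb, h]

theorem pvClimb_step_mem (L : List Int) (c : Int) (h : c ∈ L) :
    pvClimb L L.length c = 1 + pvClimb L L.length (c + 1) := by
  have hne : L ≠ [] := by rintro rfl; simp at h
  have hlen : 1 ≤ L.length := List.length_pos_iff.mpr hne
  obtain ⟨f, hf⟩ : ∃ f, L.length = f + 1 := ⟨L.length - 1, by omega⟩
  have hcount : 1 ≤ L.count c := List.one_le_count_iff.mpr h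
  have hsplit := pvFilter_split L c
  have hle : (L.filter (fun w => decide (c ≤ w))).length ≤ L.length :=
    List.length_filter_le _ _
  have hbound : (L.filter (fun w => decide (c + 1 ≤ w))).length ≤ f := by omega
  calc pvClimb L L.length c = pvClimb L (f + 1) c := by rw [hf]
    _ = 1 + pvClimb L f (c + 1) := by simp only [pvClimb, if_pos h]
    _ = 1 + pvClimb L (f + 1) (c + 1) := by rw [pvClimb_succ_fuel L f (c + 1) hbound]
    _ = 1 + pvClimb L L.length (c + 1) := by rw [hf]

-- a value strictly between x and everything after it is not in the sorted list
theorem pvGap_not_mem (L0 pre rest : List Int) (x c : Int)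
    (hL : L0 = pre ++ x :: rest) (hp : L0.Pairwise (· < ·))
    (hxc : x < c) (hcr : ∀ b ∈ rest, c < b) : c ∉ L0 := by
  subst hL
  intro hmem
  rcases List.mem_append.mp hmem with hpre | hsuf
  · have hx : ∀ b ∈ x :: rest, (fun a b => a < b) c b :=
      (List.pairwise_append.mp hp).2.2 c hpre
    have := hx x (by simp)
    omega
  · rcases List.mem_cons.mp hsuf with rfl | hr
    · omega
    · have := hcr c hr; omega

-- MAIN: A's scan over a suffix of the sorted list equals B's run-start fold
theorem pvMain (L0 : List Int) (hp : L0.Pairwise (· < ·)) :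
    ∀ (xs : List Int) (x maxc curc : Int),
    (x :: xs) <:+ L0 → 1 ≤ curc → curc ≤ maxc →
    pvScan x maxc curc xs
      = xs.foldl
          (fun b v => if (v - 1) ∈ L0 then b
                      else max b (1 + pvClimb L0 L0.length (v + 1)))
          (max maxc (curc - 1 + (1 + pvClimb L0 L0.length (x + 1)))) := by
  intro xs
  induction xs with
  | nil =>
    intro x maxc curc hsuf hc1 hcm
    obtain ⟨pre, hL⟩ := hsuf
    have hx1 : (x + 1) ∉ L0 :=
      pvGap_not_mem L0 pre [] x (x + 1) hL.symm hp (by omega) (by simp)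
    simp only [pvScan, List.foldl_nil]
    rw [pvClimb_not_mem L0 _ _ hx1]
    omega
  | cons y ys ih =>
    intro x maxc curc hsuf hc1 hcm
    obtain ⟨pre, hL⟩ := hsuf
    have hps : (x :: y :: ys).Pairwise (· < ·) :=
      hp.sublist (List.IsSuffix.sublist ⟨pre, hL⟩)
    have hxy : x < y := (List.pairwise_cons.mp hps).1 y (by simp)
    have hys : ∀ b ∈ ys, y < b :=
      (List.pairwise_cons.mp (List.pairwise_cons.mp hps).2).1
    have hxmem : x ∈ L0 := by rw [← hL]; simp
    have hymem : y ∈ L0 := by rw [← hL]; simp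
    have hsuf' : (y :: ys) <:+ L0 := ⟨pre ++ [x], by simpa using hL⟩
    simp only [pvScan, List.foldl_cons]
    by_cases hy : y = x + 1
    · subst hy
      rw [if_pos rfl]
      rw [ih (x + 1) (max maxc (curc + 1)) (curc + 1) hsuf' (by omega) (le_max_right _ _)]
      have hym : ((x : Int) + 1 - 1) ∈ L0 := by simpa using hxmem
      rw [if_pos hym]
      have hstep : pvClimb L0 L0.length (x + 1) = 1 + pvClimb L0 L0.length (x + 1 + 1) :=
        pvClimb_step_mem L0 (x + 1) hymem
      have hclnn : 0 ≤ pvClimb L0 L0.length (x + 1 + 1) := pvClimb_nonneg L0 _ _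
      congr 1
      rw [hstep]
      omega
    · rw [if_neg hy]
      have hxy1 : x + 1 < y := by
        rcases lt_or_eq_of_le (by omega : x + 1 ≤ y) with h | h
        · exact h
        · exact absurd h.symm hy
      have hym : ((y : Int) - 1) ∉ L0 :=
        pvGap_not_mem L0 pre (y :: ys) x (y - 1) hL.symm hp (by omega)
          (by intro b hb; rcases List.mem_cons.mp hb with rfl | hb' <;> [omega; skip]
              have := hys b hb'; omega)
      have hx1 : (x + 1) ∉ L0 :=
        pvGap_not_mem L0 pre (y :: ys) x (x + 1) hL.symm hp (by omega)
          (by intro b hb; rcases List.mem_cons.mp hb with rfl | hb' <;> [omega; skip]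
              have := hys b hb'; omega)
      rw [ih y maxc 1 hsuf' le_rfl (by omega)]
      rw [if_neg hym]
      rw [pvClimb_not_mem L0 _ _ hx1]
      congr 1
      omega


-- pyGetD on a cons cell at a positive index reads the tail
theorem pvGetD_cons (x : Int) (xs : List Int) (i d : Int) (h : 0 < i) :
    PySem.List.pyGetD (x :: xs) i d = PySem.List.pyGetD xs (i - 1) d := by
  rw [PySem.List.pyGetD_of_nonneg _ _ (by omega), PySem.List.pyGetD_of_nonneg _ _ (by omega)]
  have hh : i.toNat = (i - 1).toNat + 1 := by omega
  rw [hh, List.getD_cons_succ]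

theorem pvRange_shift (b : Int) :
    PySem.List.pyRange (1 + 1) (b + 1) = (PySem.List.pyRange 1 b).map (fun j => j + 1) := by
  rw [PySem.List.pyRange_one, PySem.List.pyRange_one, List.map_map]
  have h : (b + 1 - (1 + 1)).toNat = (b - 1).toNat := by omega
  rw [h]
  refine List.map_congr_left ?_
  intro a _
  simp only [Function.comp]
  omega

-- A's index loop over the sorted list is a fold over adjacent pairs
theorem pvZ (l : List Int) : ∀ (st : Int × Int),
    (PySem.List.pyRange 1 (l.length : Int) 1).foldl
      (fun (st : Int × Int) i =>
        if PySem.List.pyGetD l i 0 = PySem.List.pyGetD l (i - 1) 0 + 1 then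
          (max st.1 (st.2 + 1), st.2 + 1) else (st.1, 1)) st
    = (l.zip l.tail).foldl
      (fun (st : Int × Int) p =>
        if p.2 = p.1 + 1 then (max st.1 (st.2 + 1), st.2 + 1) else (st.1, 1)) st := by
  induction l with
  | nil => intro st; rw [PySem.List.pyRange_one_eq_nil (by norm_num)]; rfl
  | cons x xs ih =>
    cases xs with
    | nil =>
      intro st
      rw [PySem.List.pyRange_one_eq_nil (by norm_num)]
      rfl
    | cons y ys =>
      intro st
      have hn : (((x :: y :: ys).length : Nat) : Int) = ((y :: ys).length : Int) + 1 := by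
        push_cast [List.length_cons]; ring
      rw [hn]
      have hgt : (1 : Int) < ((y :: ys).length : Int) + 1 := by
        push_cast [List.length_cons]; omega
      rw [PySem.List.pyRange_one_cons hgt, List.foldl_cons]
      have e1 : PySem.List.pyGetD (x :: y :: ys) 1 0 = y := by
        rw [pvGetD_cons _ _ _ _ (by norm_num)]
        norm_num [PySem.List.pyGetD_zero_cons]
      have e0 : PySem.List.pyGetD (x :: y :: ys) (1 - 1) 0 = x := by
        norm_num [PySem.List.pyGetD_zero_cons]
      rw [e1, e0]
      rw [pvRange_shift ((y :: ys).length : Int), List.foldl_map]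
      rw [PySem.List.foldl_congr_mem _ _
        (fun (st : Int × Int) j =>
          if PySem.List.pyGetD (y :: ys) j 0 = PySem.List.pyGetD (y :: ys) (j - 1) 0 + 1 then
            (max st.1 (st.2 + 1), st.2 + 1) else (st.1, 1)) _
        (by
          intro st j hj
          have hj1 : 1 ≤ j := (PySem.List.mem_pyRange_one.mp hj).1
          have g1 : PySem.List.pyGetD (x :: y :: ys) (j + 1) 0
              = PySem.List.pyGetD (y :: ys) j 0 := by
            rw [pvGetD_cons _ _ _ _ (by omega)]
            congr 1
            ring
          have g0 : PySem.List.pyGetD (x :: y :: ys) (j + 1 - 1) 0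
              = PySem.List.pyGetD (y :: ys) (j - 1) 0 := by
            have hj2 : j + 1 - 1 = j := by ring
            rw [hj2, pvGetD_cons _ _ _ _ (by omega)]
          dsimp only
          rw [g1, g0])]
      rw [ih _]
      simp only [List.tail_cons, List.zip_cons_cons, List.foldl_cons]

-- the pair fold is the structural scan
theorem pvS : ∀ (xs : List Int) (x maxc curc : Int),
    (((x :: xs).zip xs).foldl
      (fun (st : Int × Int) p =>
        if p.2 = p.1 + 1 then (max st.1 (st.2 + 1), st.2 + 1) else (st.1, 1))
      (maxc, curc)).1 = pvScan x maxc curc xs := by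
  intro xs
  induction xs with
  | nil => intro x maxc curc; simp [pvScan]
  | cons y ys ih =>
    intro x maxc curc
    simp only [List.zip_cons_cons, List.foldl_cons, pvScan]
    by_cases hy : y = x + 1
    · rw [if_pos hy, if_pos hy]
      exact ih y _ _
    · rw [if_neg hy, if_neg hy]
      exact ih y _ _

-- the whole equivalence, for an arbitrary permutation pair (s = the set, l = its sorted form)
theorem pvCore (s l : List Int) (hperm : l.Perm s) (hp : l.Pairwise (· < ·)) (hlne : l ≠ []) :
    ((PySem.List.pyRange 1 (l.length : Int) 1).foldl
      (fun (st : Int × Int) i =>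
        if PySem.List.pyGetD l i 0 = PySem.List.pyGetD l (i - 1) 0 + 1 then
          (max st.1 (st.2 + 1), st.2 + 1) else (st.1, 1)) (1, 1)).1
    = s.foldl (fun best v => if (v - 1) ∈ s then best else max best (pvWalk s s.length v 1)) 1 := by
  rcases l with _ | ⟨x, xs⟩
  · exact absurd rfl hlne
  · rw [pvZ (x :: xs) (1, 1)]
    simp only [List.tail_cons]
    rw [pvS xs x 1 1]
    have hmem : ∀ w : Int, w ∈ s ↔ w ∈ x :: xs := fun w => hperm.mem_iff.symm
    have hlen : s.length = (x :: xs).length := hperm.length_eq.symm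
    have hg : (fun (best v : Int) =>
          if (v - 1) ∈ s then best else max best (pvWalk s s.length v 1))
        = (fun (best v : Int) =>
          if (v - 1) ∈ (x :: xs) then best
          else max best (1 + pvClimb (x :: xs) (x :: xs).length (v + 1))) := by
      funext best v
      rw [pvWalk_eq_climb, pvClimb_congr s (x :: xs) hmem, hlen]
      exact if_congr (hmem (v - 1)) rfl rfl
    rw [hg]
    have hrc : RightCommutative (fun (best v : Int) =>
        if (v - 1) ∈ (x :: xs) then best
        else max best (1 + pvClimb (x :: xs) (x :: xs).length (v + 1))) := by
      constructor
      intro b u v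
      dsimp only
      split_ifs <;> first | rfl | exact max_right_comm _ _ _
    rw [@List.Perm.foldl_eq _ _ _ _ _ hrc hperm.symm 1]
    rw [List.foldl_cons]
    have hxm1 : ((x : Int) - 1) ∉ (x :: xs) := by
      intro hm
      rcases List.mem_cons.mp hm with he | hm'
      · omega
      · have := (List.pairwise_cons.mp hp).1 _ hm'
        omega
    rw [if_neg hxm1]
    rw [pvMain (x :: xs) hp xs x 1 1 (List.suffix_refl _) le_rfl le_rfl]
    congr 1
    generalize pvClimb (x :: xs) (x :: xs).length (x + 1) = c
    omega

-- ===== VERDICT (by name: the statement is the Claim_ definition above) =====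
theorem check_straight_potential_py_spec : Claim_equal_check_straight_potential_py := by
  intro values _
  unfold Spec_check_straight_potential_py check_straight_potential_py check_straight_potential_py_alt
  by_cases hne : values = []
  · rw [if_pos hne, if_pos hne]
  · rw [if_neg hne, if_neg hne]
    have hsne : PySem.Set.ofList values ≠ [] := by
      obtain ⟨a, ha⟩ := List.exists_mem_of_ne_nil values hne
      exact List.ne_nil_of_mem ((PySem.Set.mem_ofList values a).mpr ha)
    have hlne : PySem.List.sorted (PySem.Set.ofList values) (fun x => x) false ≠ [] := by
      intro h
      exact hsne ((PySem.List.sorted_eq_nil_iff _ _ _).mp h)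
    exact pvCore (PySem.Set.ofList values)
      (PySem.List.sorted (PySem.Set.ofList values) (fun x => x) false)
      (PySem.List.sorted_perm _ _ _)
      (PySem.List.sorted_ofList_pairwise_lt values)
      hlne
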